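-- pv_equiv track=rewrite | github.com/nyxx-stack/graph-cli | src/graphconnect/selectors/resolvers.py | _rank_by_query
-- ===== SOURCE A (Python) =====
-- from typing import Any
--
-- def _rank_by_query(
--     rows: list[dict[str, Any]],
--     query: str,
--     name_keys: tuple[str, ...],
-- ) -> list[dict[str, Any]]:
--     q = query.strip().lower()
--
--     def score(row: dict[str, Any]) -> tuple[int, int]:
--         for key in name_keys:
--             val = str(row.get(key) or "").strip().lower()
--             if val and val == q:
--                 return (0, 0)
--         for key in name_keys:
--             val = str(row.get(key) or "").strip().lower()
--             if val and val.startswith(q):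
--                 return (1, len(val))
--         for key in name_keys:
--             val = str(row.get(key) or "").strip().lower()
--             if val and q in val:
--                 return (2, len(val))
--         return (3, 0)
--
--     ranked = sorted(rows, key=score)
--     return [row for row in ranked if score(row)[0] < 3]
-- ===== SOURCE B (Python) =====
-- def _rank_by_query(rows, query, name_keys):
--     # Bucket sort over the three match tiers with one-pass scoring per row:
--     # instead of sorting everything by a (tier, len) tuple, distribute rows into
--     # per-tier buckets, sort only the prefix/substring buckets by length, concatenate.
--     q = query.strip().lower()
--     buckets = ([], [], [])
--     for row in rows:
--         tier, ln = 3, 0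
--         for k in name_keys:
--             v = str(row.get(k) or "").strip().lower()
--             if not v:
--                 continue
--             if v == q:
--                 t, l = 0, 0
--             elif v.startswith(q):
--                 t, l = 1, len(v)
--             elif q in v:
--                 t, l = 2, len(v)
--             else:
--                 continue
--             if t < tier:
--                 tier, ln = t, l
--                 if tier == 0:
--                     break
--         if tier < 3:
--             buckets[tier].append((ln, row))
--     out = [row for _, row in buckets[0]]
--     out += [row for _, row in sorted(buckets[1], key=lambda p: p[0])]
--     out += [row for _, row in sorted(buckets[2], key=lambda p: p[0])]
--     return out
-- ===== Notes on version B (the rewrite author's own statement) =====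
-- stated objective: faster
-- what changed: B replaces A's global sort by a (tier,len) tuple key (whose key function re-scans the keys on every call, and which A re-runs once more per row in the final filter) with a bucket sort: one fused pass computes each row's best (tier,len) by folding a running minimum over the keys (early exit on an exact match) and appends the row into one of three tier buckets; only the prefix and substring buckets are then sorted by the already-computed length and the buckets concatenated, dropping non-matches with no second scoring pass.
import Mathlib
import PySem

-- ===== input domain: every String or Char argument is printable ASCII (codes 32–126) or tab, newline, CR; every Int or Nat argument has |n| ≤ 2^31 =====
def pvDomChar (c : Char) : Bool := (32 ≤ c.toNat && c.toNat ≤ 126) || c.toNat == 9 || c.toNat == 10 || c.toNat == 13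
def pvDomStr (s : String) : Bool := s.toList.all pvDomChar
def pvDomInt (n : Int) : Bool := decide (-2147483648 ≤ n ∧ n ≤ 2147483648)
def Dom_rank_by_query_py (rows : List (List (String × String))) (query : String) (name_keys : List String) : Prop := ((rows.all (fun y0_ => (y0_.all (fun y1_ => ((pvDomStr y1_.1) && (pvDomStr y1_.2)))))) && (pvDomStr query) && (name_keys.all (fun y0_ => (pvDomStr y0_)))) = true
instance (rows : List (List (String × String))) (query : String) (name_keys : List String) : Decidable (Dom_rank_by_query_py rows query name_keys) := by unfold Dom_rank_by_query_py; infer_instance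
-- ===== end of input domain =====

-- B replaces A's global sort by a (tier, len) tuple key with a bucket sort: one fused pass
-- scores each row once (running-minimum fold over the keys, early exit on an exact match) and
-- distributes it into a per-tier bucket; only the prefix and substring buckets are then sorted
-- by length and the buckets concatenated. Objective: faster (each row scored exactly once
-- instead of on every sort-key evaluation and again in the filter; measured).

-- shared transliteration of `str(row.get(key) or "").strip().lower()` (both Pythons contain
-- this exact expression; values are strings, so str() is the identity and `or ""` only maps a
-- missing key / empty value to "", which .strip() maps to "" anyway)
def pvNorm (row : List (String × String)) (k : String) : List Char :=
  PySem.Chars.lower (PySem.Chars.strip ((PySem.Dict.mk row).getD k "").toList)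

-- ===== PORT A =====
-- A's score: three separate early-return loops over name_keys (a loop returning a constant on
-- the first hit is `any`; a loop returning a value derived from the first hit is `find?`)
def pvScoreA (q : List Char) (name_keys : List String) (row : List (String × String)) : Int × Int :=
  if name_keys.any (fun k => !(pvNorm row k).isEmpty && (pvNorm row k == q)) then (0, 0)
  else
    match name_keys.find? (fun k => !(pvNorm row k).isEmpty && PySem.Chars.startswith (pvNorm row k) q) with
    | some k => (1, ((pvNorm row k).length : Int))
    | none =>
      match name_keys.find? (fun k => !(pvNorm row k).isEmpty && PySem.Chars.isIn q (pvNorm row k)) with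
      | some k => (2, ((pvNorm row k).length : Int))
      | none => (3, 0)

def rank_by_query_py (rows : List (List (String × String))) (query : String) (name_keys : List String) : List (List (String × String)) :=
  let q := PySem.Chars.lower (PySem.Chars.strip query.toList)
  let ranked := PySem.List.sorted2 rows (fun r => (pvScoreA q name_keys r).1) (fun r => (pvScoreA q name_keys r).2)
  ranked.filter (fun r => decide ((pvScoreA q name_keys r).1 < 3))

-- ===== PORT B =====
-- one value's (tier, len), `none` = the `continue` branches of Source B's inner loop
def pvClassify (q : List Char) (v : List Char) : Option (Int × Int) :=
  if v.isEmpty then none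
  else if v == q then some (0, 0)
  else if PySem.Chars.startswith v q then some (1, (v.length : Int))
  else if PySem.Chars.isIn q v then some (2, (v.length : Int))
  else none

-- Source B's inner loop: running minimum (tier, len) over the keys, early break on tier 0
def pvBest (q : List Char) (row : List (String × String)) : List String → Int × Int → Int × Int
  | [], best => best
  | k :: ks, best =>
    match pvClassify q (pvNorm row k) with
    | none => pvBest q row ks best
    | some (t, l) =>
      if t < best.1 then
        if t = 0 then (t, l) else pvBest q row ks (t, l)
      else pvBest q row ks best

def rank_by_query_py_alt (rows : List (List (String × String))) (query : String) (name_keys : List String) : List (List (String × String)) :=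
  let q := PySem.Chars.lower (PySem.Chars.strip query.toList)
  let bs := rows.foldl
    (fun (bs : List (Int × List (String × String)) × List (Int × List (String × String)) × List (Int × List (String × String))) row =>
      let s := pvBest q row name_keys (3, 0)
      if s.1 = 0 then (bs.1 ++ [(s.2, row)], bs.2.1, bs.2.2)
      else if s.1 = 1 then (bs.1, bs.2.1 ++ [(s.2, row)], bs.2.2)
      else if s.1 = 2 then (bs.1, bs.2.1, bs.2.2 ++ [(s.2, row)])
      else bs)
    ([], [], [])
  bs.1.map (·.2)
    ++ (PySem.List.sorted bs.2.1 (fun p => p.1)).map (·.2)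
    ++ (PySem.List.sorted bs.2.2 (fun p => p.1)).map (·.2)

-- ===== PRECONDITION & SPEC =====
def Spec_rank_by_query_py (rows : List (List (String × String))) (query : String) (name_keys : List String) (out : List (List (String × String))) : Prop := out = rank_by_query_py_alt rows query name_keys
instance (rows : List (List (String × String))) (query : String) (name_keys : List String) (out : List (List (String × String))) : Decidable (Spec_rank_by_query_py rows query name_keys out) := by unfold Spec_rank_by_query_py; infer_instance

-- ===== CLAIM (what is proved, stated in full; the proofs are below) =====
def Claim_equal_rank_by_query_py : Prop := ∀ (rows : List (List (String × String))) (query : String) (name_keys : List String), Dom_rank_by_query_py rows query name_keys → Spec_rank_by_query_py rows query name_keys (rank_by_query_py rows query name_keys)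

-- ===== LEMMAS AND PROOFS =====

-- `v == q` makes the startswith predicate fire; startswith makes the isIn predicate fire
lemma startswith_self (v : List Char) : PySem.Chars.startswith v v = true := by
  rw [PySem.Chars.startswith_iff]

lemma isIn_of_startswith (q v : List Char) (h : PySem.Chars.startswith v q = true) :
    PySem.Chars.isIn q v = true := by
  rw [PySem.Chars.startswith_iff] at h
  rw [PySem.Chars.isIn_iff_infix]
  exact h.isInfix

-- the three scan predicates of A, read off pvClassify
lemma pred0_eq (q v : List Char) :
    (!v.isEmpty && (v == q)) = decide ((pvClassify q v).elim (3 : Int) (·.1) = 0) := by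
  unfold pvClassify
  split_ifs with h1 h2 h3 h4 <;> simp_all

lemma pred1_eq (q v : List Char) :
    (!v.isEmpty && PySem.Chars.startswith v q) = decide ((pvClassify q v).elim (3 : Int) (·.1) ≤ 1) := by
  unfold pvClassify
  split_ifs with h1 h2 h3 h4 <;> simp_all
  exact startswith_self q

lemma pred2_eq (q v : List Char) :
    (!v.isEmpty && PySem.Chars.isIn q v) = decide ((pvClassify q v).elim (3 : Int) (·.1) ≤ 2) := by
  unfold pvClassify
  split_ifs with h1 h2 h3 h4 <;> simp_all
  · exact isIn_of_startswith q q (startswith_self q)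
  · exact isIn_of_startswith q v h3

-- shape facts about A's score
lemma scoreA_zero (q : List Char) (ks : List String) (row : List (String × String))
    (h : ks.any (fun k => !(pvNorm row k).isEmpty && (pvNorm row k == q)) = true) :
    pvScoreA q ks row = (0, 0) := by
  unfold pvScoreA; simp [h]

lemma scoreA_pos (q : List Char) (ks : List String) (row : List (String × String))
    (h : ks.any (fun k => !(pvNorm row k).isEmpty && (pvNorm row k == q)) = false) :
    1 ≤ (pvScoreA q ks row).1 := by
  unfold pvScoreA
  rw [if_neg (by simp [h])]
  cases ks.find? (fun k => !(pvNorm row k).isEmpty && PySem.Chars.startswith (pvNorm row k) q) with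
  | some k => norm_num
  | none =>
    cases ks.find? (fun k => !(pvNorm row k).isEmpty && PySem.Chars.isIn q (pvNorm row k)) with
    | some k => norm_num
    | none => norm_num

lemma scoreA_bounds (q : List Char) (ks : List String) (row : List (String × String)) :
    0 ≤ (pvScoreA q ks row).1 ∧ (pvScoreA q ks row).1 ≤ 3 := by
  unfold pvScoreA
  split_ifs with h
  · norm_num
  · cases ks.find? (fun k => !(pvNorm row k).isEmpty && PySem.Chars.startswith (pvNorm row k) q) with
    | some k => norm_num
    | none =>
      cases ks.find? (fun k => !(pvNorm row k).isEmpty && PySem.Chars.isIn q (pvNorm row k)) with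
      | some k => norm_num
      | none => norm_num

lemma scoreA_snd_zero (q : List Char) (ks : List String) (row : List (String × String))
    (h : (pvScoreA q ks row).1 = 0) : (pvScoreA q ks row).2 = 0 := by
  unfold pvScoreA at h ⊢
  split_ifs at h ⊢ with hany
  · rfl
  · cases hf : ks.find? (fun k => !(pvNorm row k).isEmpty && PySem.Chars.startswith (pvNorm row k) q) with
    | some k => rw [hf] at h; norm_num at h
    | none =>
      simp only [hf] at h ⊢
      cases hg : ks.find? (fun k => !(pvNorm row k).isEmpty && PySem.Chars.isIn q (pvNorm row k)) with
      | some k => simp only [hg] at h; norm_num at h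
      | none => rfl

lemma scoreA_three (q : List Char) (ks : List String) (row : List (String × String))
    (h : (pvScoreA q ks row).1 = 3) : pvScoreA q ks row = (3, 0) := by
  unfold pvScoreA at h ⊢
  split_ifs at h ⊢ with hany
  · norm_num at h
  · cases hf : ks.find? (fun k => !(pvNorm row k).isEmpty && PySem.Chars.startswith (pvNorm row k) q) with
    | some k => simp only [hf] at h; norm_num at h
    | none =>
      simp only [hf] at h ⊢
      cases hg : ks.find? (fun k => !(pvNorm row k).isEmpty && PySem.Chars.isIn q (pvNorm row k)) with
      | some k => simp only [hg] at h; norm_num at h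
      | none => rfl

-- how A's score unfolds on one more key, in terms of pvClassify
lemma scoreA_cons_none (q : List Char) (k : String) (ks : List String) (row : List (String × String))
    (h : pvClassify q (pvNorm row k) = none) :
    pvScoreA q (k :: ks) row = pvScoreA q ks row := by
  have h0 : (!(pvNorm row k).isEmpty && (pvNorm row k == q)) = false := by
    rw [pred0_eq, h]; simp
  have h1 : (!(pvNorm row k).isEmpty && PySem.Chars.startswith (pvNorm row k) q) = false := by
    rw [pred1_eq, h]; simp
  have h2 : (!(pvNorm row k).isEmpty && PySem.Chars.isIn q (pvNorm row k)) = false := by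
    rw [pred2_eq, h]; simp
  unfold pvScoreA
  rw [List.any_cons, h0, List.find?_cons_of_neg (by simp [h1]), List.find?_cons_of_neg (by simp [h2])]
  simp

lemma scoreA_cons_some (q : List Char) (k : String) (ks : List String) (row : List (String × String))
    (t l : Int) (h : pvClassify q (pvNorm row k) = some (t, l)) :
    pvScoreA q (k :: ks) row = if (pvScoreA q ks row).1 < t then pvScoreA q ks row else (t, l) := by
  have hb := scoreA_bounds q ks row
  unfold pvClassify at h
  by_cases he : (pvNorm row k).isEmpty
  · rw [if_pos he] at h; exact absurd h (by simp)
  rw [if_neg he] at h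
  by_cases hq : (pvNorm row k == q)
  · rw [if_pos hq] at h
    simp only [Option.some.injEq, Prod.mk.injEq] at h
    rcases h with ⟨rfl, rfl⟩
    rw [scoreA_zero q (k :: ks) row (by simp only [List.any_cons, hq]; simp [he])]
    rw [if_neg (by omega)]
  rw [if_neg hq] at h
  by_cases hs : PySem.Chars.startswith (pvNorm row k) q
  · rw [if_pos hs] at h
    simp only [Option.some.injEq, Prod.mk.injEq] at h
    rcases h with ⟨rfl, rfl⟩
    by_cases hany : ks.any (fun k => !(pvNorm row k).isEmpty && (pvNorm row k == q))
    · have hz := scoreA_zero q ks row hany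
      rw [scoreA_zero q (k :: ks) row (by simp [List.any_cons, hany]), hz]
      norm_num
    · have hp := scoreA_pos q ks row (by simpa using hany)
      have hL : pvScoreA q (k :: ks) row = (1, ((pvNorm row k).length : Int)) := by
        unfold pvScoreA
        rw [List.any_cons]
        rw [if_neg (by simp [hq, hany])]
        rw [List.find?_cons_of_pos (by simp [he, hs])]
      rw [hL, if_neg (by omega)]
  rw [if_neg hs] at h
  by_cases hi : PySem.Chars.isIn q (pvNorm row k)
  · rw [if_pos hi] at h
    simp only [Option.some.injEq, Prod.mk.injEq] at h
    rcases h with ⟨rfl, rfl⟩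
    by_cases hany : ks.any (fun k => !(pvNorm row k).isEmpty && (pvNorm row k == q))
    · have hz := scoreA_zero q ks row hany
      rw [scoreA_zero q (k :: ks) row (by simp [List.any_cons, hany]), hz]
      norm_num
    · have hP1k : (!(pvNorm row k).isEmpty && PySem.Chars.startswith (pvNorm row k) q) = false := by
        simp [hs]
      have hP2k : (!(pvNorm row k).isEmpty && PySem.Chars.isIn q (pvNorm row k)) = true := by
        simp [he, hi]
      cases hf : ks.find? (fun k => !(pvNorm row k).isEmpty && PySem.Chars.startswith (pvNorm row k) q) with
      | some k' =>
        have hL : pvScoreA q (k :: ks) row = (1, ((pvNorm row k').length : Int)) := by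
          unfold pvScoreA
          rw [List.any_cons, if_neg (by simp [hq, hany]), List.find?_cons_of_neg (by simp [hP1k]), hf]
        have hR : pvScoreA q ks row = (1, ((pvNorm row k').length : Int)) := by
          unfold pvScoreA
          rw [if_neg (by simpa using hany), hf]
        rw [hL, hR, if_pos (by norm_num)]
      | none =>
        have hL : pvScoreA q (k :: ks) row = (2, ((pvNorm row k).length : Int)) := by
          unfold pvScoreA
          rw [List.any_cons, if_neg (by simp [hq, hany]), List.find?_cons_of_neg (by simp [hP1k]), hf]
          simp only []
          rw [List.find?_cons_of_pos (p := fun k => !(pvNorm row k).isEmpty && PySem.Chars.isIn q (pvNorm row k)) hP2k]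
        have hR : 2 ≤ (pvScoreA q ks row).1 := by
          unfold pvScoreA
          rw [if_neg (by simpa using hany), hf]
          cases hg : ks.find? (fun k => !(pvNorm row k).isEmpty && PySem.Chars.isIn q (pvNorm row k)) with
          | some k' => norm_num
          | none => norm_num
        rw [hL, if_neg (by omega)]
  rw [if_neg hi] at h
  exact absurd h (by simp)

lemma classify_shape (q v : List Char) (t l : Int) (h : pvClassify q v = some (t, l)) :
    (0 ≤ t ∧ t ≤ 2) ∧ (t = 0 → l = 0) := by
  unfold pvClassify at h
  split_ifs at h
  all_goals simp only [Option.some.injEq, Prod.mk.injEq] at h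
  all_goals obtain ⟨ht, hl⟩ := h
  all_goals subst ht; subst hl; norm_num

-- B's running-minimum fold computes A's staged score
lemma best_spec (q : List Char) (row : List (String × String)) (ks : List String) :
    ∀ best : Int × Int, 1 ≤ best.1 → best.1 ≤ 3 →
      pvBest q row ks best = if (pvScoreA q ks row).1 < best.1 then pvScoreA q ks row else best := by
  induction ks with
  | nil =>
    intro best h1 h3
    rw [show pvScoreA q [] row = (3, 0) from rfl]
    simp only [pvBest]
    rw [if_neg (by simp; omega)]
  | cons k ks ih =>
    intro best h1 h3
    cases hc : pvClassify q (pvNorm row k) with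
    | none =>
      simp only [pvBest, hc]
      rw [scoreA_cons_none q k ks row hc]
      exact ih best h1 h3
    | some tl =>
      obtain ⟨t, l⟩ := tl
      obtain ⟨⟨ht0', ht2⟩, htl0⟩ := classify_shape q (pvNorm row k) t l hc
      have hbA := scoreA_bounds q ks row
      rw [scoreA_cons_some q k ks row t l hc]
      simp only [pvBest, hc]
      by_cases h1t : t < best.1
      · rw [if_pos h1t]
        by_cases ht0 : t = 0
        · subst ht0
          have hl0 : l = 0 := htl0 rfl
          subst hl0
          rw [if_pos rfl,
              if_neg (show ¬ (pvScoreA q ks row).1 < (0 : Int) by omega),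
              if_pos (show (((0 : Int), (0 : Int)) : Int × Int).1 < best.1 from h1t)]
        · rw [if_neg ht0,
              ih (t, l) (show (1 : Int) ≤ t by omega) (show t ≤ (3 : Int) by omega)]
          by_cases hA : (pvScoreA q ks row).1 < t
          · rw [if_pos (show (pvScoreA q ks row).1 < ((t, l) : Int × Int).1 from hA),
                if_pos (show (pvScoreA q ks row).1 < best.1 by omega)]
          · rw [if_neg (show ¬ (pvScoreA q ks row).1 < ((t, l) : Int × Int).1 from hA),
                if_pos (show ((t, l) : Int × Int).1 < best.1 from h1t)]
      · rw [if_neg h1t, ih best h1 h3]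
        by_cases hA : (pvScoreA q ks row).1 < t
        · rw [if_pos hA]
        · rw [if_neg hA,
              if_neg (show ¬ ((t, l) : Int × Int).1 < best.1 from h1t)]
          rw [if_neg (show ¬ (pvScoreA q ks row).1 < best.1 by omega)]

lemma score_eq (q : List Char) (ks : List String) (row : List (String × String)) :
    pvBest q row ks (3, 0) = pvScoreA q ks row := by
  have hb := scoreA_bounds q ks row
  rw [best_spec q row ks (3, 0) (by norm_num) (by norm_num)]
  by_cases h : (pvScoreA q ks row).1 < ((3 : Int), (0 : Int)).1
  · rw [if_pos h]
  · rw [if_neg h]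
    simp only [] at h
    exact (scoreA_three q ks row (by simp at h; omega)).symm

-- B's bucket-building fold is three filters (generic in the scoring function)
lemma buckets_eq {α : Type} (f : α → Int × Int) (rows : List α)
    (a0 a1 a2 : List (Int × α)) :
    rows.foldl
      (fun (bs : List (Int × α) × List (Int × α) × List (Int × α)) row =>
        let s := f row
        if s.1 = 0 then (bs.1 ++ [(s.2, row)], bs.2.1, bs.2.2)
        else if s.1 = 1 then (bs.1, bs.2.1 ++ [(s.2, row)], bs.2.2)
        else if s.1 = 2 then (bs.1, bs.2.1, bs.2.2 ++ [(s.2, row)])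
        else bs) (a0, a1, a2)
      = (a0 ++ (rows.filter (fun r => (f r).1 = 0)).map (fun r => ((f r).2, r)),
         a1 ++ (rows.filter (fun r => (f r).1 = 1)).map (fun r => ((f r).2, r)),
         a2 ++ (rows.filter (fun r => (f r).1 = 2)).map (fun r => ((f r).2, r))) := by
  induction rows generalizing a0 a1 a2 with
  | nil => simp
  | cons r rs ih =>
    by_cases h0 : (f r).1 = 0
    · simp [h0, ih]
    · by_cases h1 : (f r).1 = 1
      · simp [h1, ih]
      · by_cases h2 : (f r).1 = 2
        · simp [h2, ih]
        · simp [h0, h1, h2, ih]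

-- insertBy skips a block it is not before, and lands inside a block it is before the tail of
lemma insertBy_append_left {α : Type} (before : α → α → Bool) (x : α) (ys zs : List α)
    (h : ∀ y ∈ ys, before x y = false) :
    PySem.List.insertBy before x (ys ++ zs) = ys ++ PySem.List.insertBy before x zs := by
  induction ys with
  | nil => rfl
  | cons y ys ih =>
    have hy := h y List.mem_cons_self
    simp only [List.cons_append, PySem.List.insertBy, hy, Bool.false_eq_true, if_false,
      List.cons.injEq, true_and]
    exact ih (fun y' hy' => h y' (List.mem_cons_of_mem _ hy'))

lemma insertBy_segment {α : Type} (before alt : α → α → Bool) (x : α) (ys zs : List α)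
    (hy : ∀ y ∈ ys, before x y = alt x y) (hz : ∀ z ∈ zs, before x z = true) :
    PySem.List.insertBy before x (ys ++ zs) = PySem.List.insertBy alt x ys ++ zs := by
  induction ys with
  | nil =>
    cases zs with
    | nil => rfl
    | cons z zs =>
      have hz' := hz z List.mem_cons_self
      simp only [List.nil_append, PySem.List.insertBy, hz', if_true]
      rfl
  | cons y ys ih =>
    have hy' := hy y List.mem_cons_self
    simp only [List.cons_append, PySem.List.insertBy, hy']
    by_cases hxy : alt x y = true
    · simp [hxy]
    · simp only [hxy, Bool.false_eq_true, if_false, List.cons_append, List.cons.injEq, true_and]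
      exact ih (fun y' h' => hy y' (List.mem_cons_of_mem _ h'))

-- sorting commutes with a decoration map
lemma insertBy_map {α β : Type} (g : α → β) (cmp : β → β → Bool) (x : α) (ys : List α) :
    PySem.List.insertBy cmp (g x) (ys.map g)
      = (PySem.List.insertBy (fun a b => cmp (g a) (g b)) x ys).map g := by
  induction ys with
  | nil => rfl
  | cons y ys ih =>
    simp only [List.map_cons, PySem.List.insertBy]
    by_cases hc : cmp (g x) (g y) = true
    · simp [hc]
    · simp [hc, ih]

lemma sorted_map {α β κ : Type} [LinearOrder κ] (g : α → β) (key : β → κ) (xs : List α) :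
    PySem.List.sorted (xs.map g) key = (PySem.List.sorted xs (fun x => key (g x))).map g := by
  rw [PySem.List.sorted_eq_foldl_insertBy, PySem.List.sorted_eq_foldl_insertBy]
  have main : ∀ acc : List α,
      (xs.map g).foldl (fun a b => PySem.List.insertBy (fun p q' => decide (key p < key q')) b a) (acc.map g)
        = (xs.foldl (fun a b => PySem.List.insertBy (fun p q' => decide (key (g p) < key (g q'))) b a) acc).map g := by
    induction xs with
    | nil => intro acc; rfl
    | cons z zs ih =>
      intro acc
      simp only [List.map_cons, List.foldl_cons]
      rw [insertBy_map g (fun p q' => decide (key p < key q')) z acc]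
      exact ih _
  simpa using main []

-- one insertion step of the tuple-key sort, on a list already laid out in tier segments
lemma sorted2_concat {α : Type} (t l : α → Int) (xs : List α) (x : α) :
    PySem.List.sorted2 (xs ++ [x]) t l
      = PySem.List.insertBy
          (fun a b => decide (t a < t b) || (!decide (t b < t a) && decide (l a < l b))) x
          (PySem.List.sorted2 xs t l) := by
  simp [PySem.List.sorted2, List.foldl_append]

lemma sorted_concat {α κ : Type} [LinearOrder κ] (key : α → κ) (xs : List α) (x : α) :
    PySem.List.sorted (xs ++ [x]) key
      = PySem.List.insertBy (fun a b => decide (key a < key b)) x (PySem.List.sorted xs key) := by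
  rw [PySem.List.sorted_eq_foldl_insertBy, PySem.List.sorted_eq_foldl_insertBy, List.foldl_append]
  rfl

-- the tuple-key stable sort splits into per-tier stable sorts by length
lemma sort_decomp {α : Type} (t l : α → Int) (rows : List α)
    (hb : ∀ r, 0 ≤ t r ∧ t r ≤ 3) :
    PySem.List.sorted2 rows t l
      = PySem.List.sorted (rows.filter (fun r => t r = 0)) l
        ++ PySem.List.sorted (rows.filter (fun r => t r = 1)) l
        ++ PySem.List.sorted (rows.filter (fun r => t r = 2)) l
        ++ PySem.List.sorted (rows.filter (fun r => t r = 3)) l := by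
  induction rows using List.reverseRecOn with
  | nil => rfl
  | append_singleton xs x ih =>
    have hbx := hb x
    have hmem : ∀ (i : Int) (y : α),
        y ∈ PySem.List.sorted (xs.filter (fun r => decide (t r = i))) l → t y = i := fun i y hy => by
      rw [PySem.List.mem_sorted] at hy
      exact of_decide_eq_true (List.mem_filter.mp hy).2
    rw [sorted2_concat, ih]
    simp only [List.filter_append, List.filter_cons, List.filter_nil]
    rcases show t x = 0 ∨ t x = 1 ∨ t x = 2 ∨ t x = 3 by omega with h | h | h | h
    · simp only [h]
      norm_num
      rw [sorted_concat]
      exact insertBy_segment _ _ x _ _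
        (fun y hy => by have := hmem 0 y hy; simp [h, this])
        (fun z hz => by
          rcases List.mem_append.mp hz with h1 | h23
          · have := hmem 1 z h1; simp [h, this]
          · rcases List.mem_append.mp h23 with h2 | h3
            · have := hmem 2 z h2; simp [h, this]
            · have := hmem 3 z h3; simp [h, this])
    · simp only [h]
      norm_num
      rw [sorted_concat]
      rw [insertBy_append_left _ x _ _ (fun y hy => by have := hmem 0 y hy; simp [h, this])]
      congr 1
      exact insertBy_segment _ _ x _ _
        (fun y hy => by have := hmem 1 y hy; simp [h, this])
        (fun z hz => by
          rcases List.mem_append.mp hz with h2 | h3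
          · have := hmem 2 z h2; simp [h, this]
          · have := hmem 3 z h3; simp [h, this])
    · simp only [h]
      norm_num
      rw [sorted_concat]
      rw [insertBy_append_left _ x _ _ (fun y hy => by have := hmem 0 y hy; simp [h, this])]
      congr 1
      rw [insertBy_append_left _ x _ _ (fun y hy => by have := hmem 1 y hy; simp [h, this])]
      congr 1
      exact insertBy_segment _ _ x _ _
        (fun y hy => by have := hmem 2 y hy; simp [h, this])
        (fun z hz => by have := hmem 3 z hz; simp [h, this])
    · simp only [h]
      norm_num
      rw [sorted_concat]
      rw [insertBy_append_left _ x _ _ (fun y hy => by have := hmem 0 y hy; simp [h, this])]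
      congr 1
      rw [insertBy_append_left _ x _ _ (fun y hy => by have := hmem 1 y hy; simp [h, this])]
      congr 1
      rw [insertBy_append_left _ x _ _ (fun y hy => by have := hmem 2 y hy; simp [h, this])]
      congr 1
      have := insertBy_segment
        (fun a b => decide (t a < t b) || (!decide (t b < t a) && decide (l a < l b)))
        (fun a b => decide (l a < l b)) x
        (PySem.List.sorted (xs.filter (fun r => decide (t r = 3))) l) []
        (fun y hy => by have := hmem 3 y hy; simp [h, this])
        (fun z hz => absurd hz List.not_mem_nil)
      simpa using this

-- ===== VERDICT (by name: the statement is the Claim_ definition above) =====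
theorem rank_by_query_py_spec : Claim_equal_rank_by_query_py := by
  intro rows query name_keys _
  unfold Spec_rank_by_query_py rank_by_query_py rank_by_query_py_alt
  simp only [score_eq]
  generalize PySem.Chars.lower (PySem.Chars.strip query.toList) = qv
  rw [buckets_eq (pvScoreA qv name_keys) rows [] [] []]
  simp only [List.nil_append]
  have hb := fun r => scoreA_bounds qv name_keys r
  rw [sort_decomp (fun r => (pvScoreA qv name_keys r).1) (fun r => (pvScoreA qv name_keys r).2) rows hb]
  have hmem : ∀ (i : Int) (y : List (String × String)),
      y ∈ PySem.List.sorted (rows.filter (fun r => decide ((pvScoreA qv name_keys r).1 = i))) (fun r => (pvScoreA qv name_keys r).2)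
        → (pvScoreA qv name_keys y).1 = i := fun i y hy => by
    rw [PySem.List.mem_sorted] at hy
    exact of_decide_eq_true (List.mem_filter.mp hy).2
  rw [List.filter_append, List.filter_append, List.filter_append]
  have e0 : List.filter (fun r => decide ((pvScoreA qv name_keys r).1 < 3)) (PySem.List.sorted (rows.filter (fun r => decide ((pvScoreA qv name_keys r).1 = 0))) (fun r => (pvScoreA qv name_keys r).2)) = PySem.List.sorted (rows.filter (fun r => decide ((pvScoreA qv name_keys r).1 = 0))) (fun r => (pvScoreA qv name_keys r).2) :=
    List.filter_eq_self.mpr (fun y hy => by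
      have := hmem 0 y hy; simp only [decide_eq_true_eq]; omega)
  have e1 : List.filter (fun r => decide ((pvScoreA qv name_keys r).1 < 3)) (PySem.List.sorted (rows.filter (fun r => decide ((pvScoreA qv name_keys r).1 = 1))) (fun r => (pvScoreA qv name_keys r).2)) = PySem.List.sorted (rows.filter (fun r => decide ((pvScoreA qv name_keys r).1 = 1))) (fun r => (pvScoreA qv name_keys r).2) :=
    List.filter_eq_self.mpr (fun y hy => by
      have := hmem 1 y hy; simp only [decide_eq_true_eq]; omega)
  have e2 : List.filter (fun r => decide ((pvScoreA qv name_keys r).1 < 3)) (PySem.List.sorted (rows.filter (fun r => decide ((pvScoreA qv name_keys r).1 = 2))) (fun r => (pvScoreA qv name_keys r).2)) = PySem.List.sorted (rows.filter (fun r => decide ((pvScoreA qv name_keys r).1 = 2))) (fun r => (pvScoreA qv name_keys r).2) :=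
    List.filter_eq_self.mpr (fun y hy => by
      have := hmem 2 y hy; simp only [decide_eq_true_eq]; omega)
  have e3 : List.filter (fun r => decide ((pvScoreA qv name_keys r).1 < 3)) (PySem.List.sorted (rows.filter (fun r => decide ((pvScoreA qv name_keys r).1 = 3))) (fun r => (pvScoreA qv name_keys r).2)) = [] :=
    List.filter_eq_nil_iff.mpr (fun y hy => by
      have := hmem 3 y hy; simp only [decide_eq_true_eq]; omega)
  rw [e0, e1, e2, e3, List.append_nil]
  -- tier-0 segment: the sort by length is the identity (every length is 0), and B keeps order
  have a0 : PySem.List.sorted (rows.filter (fun r => decide ((pvScoreA qv name_keys r).1 = 0))) (fun r => (pvScoreA qv name_keys r).2) = (rows.filter (fun r => decide ((pvScoreA qv name_keys r).1 = 0))) :=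
    PySem.List.sorted_eq_self_of_pairwise _ _
      (List.pairwise_of_forall_mem_list (fun a ha b hb' => by
        have ha0 := scoreA_snd_zero qv name_keys a (of_decide_eq_true (List.mem_filter.mp ha).2)
        have hb0 := scoreA_snd_zero qv name_keys b (of_decide_eq_true (List.mem_filter.mp hb').2)
        omega))
  have m0 : List.map (fun x => x.2) (List.map (fun r => ((pvScoreA qv name_keys r).2, r)) (rows.filter (fun r => decide ((pvScoreA qv name_keys r).1 = 0)))) = (rows.filter (fun r => decide ((pvScoreA qv name_keys r).1 = 0))) := by
    rw [List.map_map]; exact List.map_id _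
  have m1 : List.map (fun x => x.2)
      (PySem.List.sorted (List.map (fun r => ((pvScoreA qv name_keys r).2, r)) (rows.filter (fun r => decide ((pvScoreA qv name_keys r).1 = 1)))) (fun p => p.1)) = PySem.List.sorted (rows.filter (fun r => decide ((pvScoreA qv name_keys r).1 = 1))) (fun r => (pvScoreA qv name_keys r).2) := by
    rw [sorted_map, List.map_map]; exact List.map_id _
  have m2 : List.map (fun x => x.2)
      (PySem.List.sorted (List.map (fun r => ((pvScoreA qv name_keys r).2, r)) (rows.filter (fun r => decide ((pvScoreA qv name_keys r).1 = 2)))) (fun p => p.1)) = PySem.List.sorted (rows.filter (fun r => decide ((pvScoreA qv name_keys r).1 = 2))) (fun r => (pvScoreA qv name_keys r).2) := by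
    rw [sorted_map, List.map_map]; exact List.map_id _
  rw [m0, m1, m2, a0]
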